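-- pv_equiv track=rewrite | github.com/PlaviAjvar/AdventOfCode2019 | day_4.py | has_same_digit
-- ===== SOURCE A (Python) =====
-- def has_same_digit(n):
--     dig = [False] * 10
--     while n > 0:
--         if dig[n % 10] == True:
--             return True
--         dig[n % 10] = True
--         n //= 10
--     return False
-- ===== SOURCE B (Python) =====
-- def has_same_digit(n):
--     digits = []
--     while n > 0:
--         n, d = divmod(n, 10)
--         digits.append(d)
--     return len(set(digits)) != len(digits)
-- ===== Notes on version B (the rewrite author's own statement) =====
-- stated objective: simpler
-- what changed: B collects the full digit list first and decides by a single distinct-count vs total-count comparison, instead of A's boolean seen-array with per-step membership test and early exit.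
import Mathlib
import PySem

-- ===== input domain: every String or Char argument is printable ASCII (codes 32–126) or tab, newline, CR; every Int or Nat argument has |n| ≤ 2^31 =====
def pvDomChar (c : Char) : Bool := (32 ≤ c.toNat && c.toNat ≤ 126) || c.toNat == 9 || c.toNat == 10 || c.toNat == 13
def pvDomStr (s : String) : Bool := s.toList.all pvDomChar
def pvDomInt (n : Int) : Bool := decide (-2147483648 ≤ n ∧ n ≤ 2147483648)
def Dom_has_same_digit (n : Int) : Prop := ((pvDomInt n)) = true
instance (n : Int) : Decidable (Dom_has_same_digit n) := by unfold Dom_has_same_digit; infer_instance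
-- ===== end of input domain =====

-- B changes the decomposition: it collects all digits first and compares distinct-count to
-- total-count, instead of A's boolean seen-array with a membership check and early exit.

-- ===== PORT A =====
-- A's while loop; dig has length 10 and the index `n % 10` lies in [0,10) whenever 0 < n,
-- so Python's dig[n % 10] read/write never raises: pyGetD/pySetD are exact here.
def pvLoopA (n : Int) (dig : List Bool) : Bool :=
  if 0 < n then
    if PySem.List.pyGetD dig (PySem.Int.mod n 10) false == true then true
    else pvLoopA (PySem.Int.floordiv n 10) (PySem.List.pySetD dig (PySem.Int.mod n 10) true)
  else false
termination_by n.toNat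
decreasing_by
  rw [PySem.Int.floordiv_eq_ediv_of_pos (by norm_num : (0:Int) < 10)]
  omega

def has_same_digit (n : Int) : Bool := pvLoopA n (List.replicate 10 false)

-- ===== PORT B =====
-- B's while loop: digits.append(d) with n, d = divmod(n, 10)
def pvDigitsB (n : Int) : List Int :=
  if 0 < n then PySem.Int.mod n 10 :: pvDigitsB (PySem.Int.floordiv n 10) else []
termination_by n.toNat
decreasing_by
  rw [PySem.Int.floordiv_eq_ediv_of_pos (by norm_num : (0:Int) < 10)]
  omega

def has_same_digit_alt (n : Int) : Bool :=
  let digits := pvDigitsB n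
  decide (PySem.Set.len (PySem.Set.ofList digits) ≠ PySem.List.len digits)

-- ===== PRECONDITION & SPEC =====
def Spec_has_same_digit (n : Int) (out : Bool) : Prop := out = has_same_digit_alt n
instance (n : Int) (out : Bool) : Decidable (Spec_has_same_digit n out) := by unfold Spec_has_same_digit; infer_instance

-- ===== CLAIM (what is proved, stated in full; the proofs are below) =====
def Claim_equal_has_same_digit : Prop := ∀ (n : Int), Dom_has_same_digit n → Spec_has_same_digit n (has_same_digit n)

-- ===== LEMMAS AND PROOFS =====

-- every collected digit is in [0, 10)
theorem pvDigitsB_bounds (n : Int) : ∀ e ∈ pvDigitsB n, 0 ≤ e ∧ e < 10 := by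
  unfold pvDigitsB
  split
  · intro e he
    rcases he with _ | ⟨_, he⟩
    · exact ⟨PySem.Int.mod_nonneg n (by norm_num), PySem.Int.mod_lt n (by norm_num)⟩
    · exact pvDigitsB_bounds _ e he
  · intro e he; cases he
termination_by n.toNat
decreasing_by
  rw [PySem.Int.floordiv_eq_ediv_of_pos (by norm_num : (0:Int) < 10)]
  omega

-- set(l) (first occurrences) is a sublist of l
theorem ofList_sublist {α : Type} [BEq α] [LawfulBEq α] (l : List α) :
    (PySem.Set.ofList l).Sublist l := by
  induction l with
  | nil => simp [PySem.Set.ofList]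
  | cons x xs ih =>
    rw [PySem.Set.ofList_cons]
    exact List.Sublist.cons₂ x (List.Sublist.trans List.filter_sublist ih)

-- len(set(l)) == len(l) exactly when l has no duplicates
theorem ofList_length_eq_iff {α : Type} [BEq α] [LawfulBEq α] (l : List α) :
    (PySem.Set.ofList l).length = l.length ↔ l.Nodup := by
  constructor
  · intro h
    have := (ofList_sublist l).eq_of_length h
    rw [← this]
    exact PySem.Set.nodup_ofList l
  · intro h
    rw [PySem.Set.ofList_eq_self_of_nodup l h]

-- updating the seen-array at d and then testing membership over a digit list
theorem any_pySetD (l : List Int) (hl : ∀ e ∈ l, 0 ≤ e ∧ e < 10)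
    (d : Int) (hd0 : 0 ≤ d) (hd : d < 10) (dig : List Bool) (hlen : dig.length = 10) :
    (l.any fun e => PySem.List.pyGetD (PySem.List.pySetD dig d true) e false)
      = (decide (d ∈ l) || l.any fun e => PySem.List.pyGetD dig e false) := by
  induction l with
  | nil => simp
  | cons x xs ih =>
    obtain ⟨hx0, hx10⟩ := hl x (by simp)
    have hrw : PySem.List.pyGetD (PySem.List.pySetD dig d true) x false
        = if x = d then true else PySem.List.pyGetD dig x false := by
      have hx : ((x.toNat : Nat) : Int) = x := by omega
      have hdn : ((d.toNat : Nat) : Int) = d := by omega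
      rw [← hx, ← hdn, PySem.List.pyGetD_pySetD_natCast dig d.toNat x.toNat true false (by omega)]
      by_cases h : x.toNat = d.toNat <;> simp [h] <;> omega
    have ihx := ih (fun e he => hl e (by simp [he]))
    by_cases h : x = d
    · subst h
      simp [hrw, ihx]
    · have hne : ¬ d = x := fun hh => h hh.symm
      simp only [List.any_cons, hrw, if_neg h, ihx, List.mem_cons]
      by_cases hm : d ∈ xs <;> cases hx : PySem.List.pyGetD dig x false <;> simp [hm, hne]

-- characterization of A's loop in terms of B's digit list
theorem pvLoopA_char (n : Int) (dig : List Bool) (hlen : dig.length = 10) :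
    pvLoopA n dig
      = (((pvDigitsB n).any fun e => PySem.List.pyGetD dig e false)
          || !decide (pvDigitsB n).Nodup) := by
  rw [pvLoopA, pvDigitsB]
  split
  · rename_i hn
    have hd0 : 0 ≤ PySem.Int.mod n 10 := PySem.Int.mod_nonneg n (by norm_num)
    have hd10 : PySem.Int.mod n 10 < 10 := PySem.Int.mod_lt n (by norm_num)
    have hget : PySem.List.pyGetD dig (PySem.Int.mod n 10) false
        = dig[(PySem.Int.mod n 10).toNat]'(by omega) := by
      exact PySem.List.pyGetD_eq_getElem dig false hd0 (by rw [hlen]; omega)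
    by_cases hb : PySem.List.pyGetD dig (PySem.Int.mod n 10) false = true
    · rw [if_pos (by simp only [beq_iff_eq]; exact hb)]
      simp only [List.any_cons, hb, Bool.true_or]
    · have hb' : PySem.List.pyGetD dig (PySem.Int.mod n 10) false = false := by
        cases h : PySem.List.pyGetD dig (PySem.Int.mod n 10) false
        · rfl
        · exact absurd h hb
      rw [if_neg (by simp only [beq_iff_eq]; exact hb)]
      rw [pvLoopA_char (PySem.Int.floordiv n 10) _ (by rw [PySem.List.length_pySetD]; exact hlen)]
      rw [any_pySetD _ (pvDigitsB_bounds _) _ hd0 hd10 dig hlen]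
      simp only [List.any_cons, hb', List.nodup_cons, Bool.false_or]
      by_cases hm : PySem.Int.mod n 10 ∈ pvDigitsB (PySem.Int.floordiv n 10) <;>
        by_cases hnd : (pvDigitsB (PySem.Int.floordiv n 10)).Nodup <;>
        cases hany : ((pvDigitsB (PySem.Int.floordiv n 10)).any fun e => PySem.List.pyGetD dig e false) <;>
        simp [hm, hnd, hany]
  · simp
termination_by n.toNat
decreasing_by
  rw [PySem.Int.floordiv_eq_ediv_of_pos (by norm_num : (0:Int) < 10)]
  omega

-- the initial all-false seen-array reports no digit as seen
theorem any_replicate_false (l : List Int) (hl : ∀ e ∈ l, 0 ≤ e ∧ e < 10) :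
    (l.any fun e => PySem.List.pyGetD (List.replicate 10 false) e false) = false := by
  induction l with
  | nil => rfl
  | cons x xs ih =>
    obtain ⟨hx0, hx10⟩ := hl x (by simp)
    have hget := PySem.List.pyGetD_eq_getElem (List.replicate 10 false) (d := false) hx0
      (by simp; omega)
    simp only [List.any_cons, hget, List.getElem_replicate, Bool.false_or]
    exact ih (fun e he => hl e (by simp [he]))

-- ===== VERDICT (by name: the statement is the Claim_ definition above) =====
theorem has_same_digit_spec : Claim_equal_has_same_digit := by
  intro n _
  unfold Spec_has_same_digit has_same_digit has_same_digit_alt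
  rw [pvLoopA_char n _ (by simp)]
  rw [any_replicate_false _ (pvDigitsB_bounds n)]
  simp only [Bool.false_or, PySem.Set.len, PySem.List.len_eq]
  rcases Decidable.em (pvDigitsB n).Nodup with h | h
  · simp [h, (ofList_length_eq_iff (pvDigitsB n)).2 h]
  · have : (PySem.Set.ofList (pvDigitsB n)).length ≠ (pvDigitsB n).length :=
      fun hc => h ((ofList_length_eq_iff _).1 hc)
    simp [h, this]
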